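-- pv_equiv track=rewrite | github.com/alinsibu93-hub/Guess-the-Song | itunes_service.py | _build_song_pool
-- ===== SOURCE A (Python) =====
-- from typing import Dict, List, Optional
--
-- _MIN_POOL = 12
--
-- def _build_song_pool(
--     song_library: List[Dict[str, str]],
--     genres: Optional[List[str]],
--     eras: Optional[List[str]],
--     count: int,
--     choices_count: int,
--     related_genres_map: Dict[str, List[str]],
-- ) -> List[Dict[str, str]]:
--     """
--     Return a candidate pool from song_library that satisfies the genre/era
--     filter, with progressive fallback when the pool is too small.
--
--     Minimum needed: enough to play `count` rounds AND generate `choices_count`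
--     distractors. We use _MIN_POOL as a floor for robustness against iTunes
--     lookup failures.
--
--     Fallback order:
--       1. Songs matching BOTH selected genres AND selected eras  (exact)
--       2. Add songs from related genres, keeping era filter      (related genres)
--       3. Remove era filter, keep original genre filter          (genre-only)
--       4. Full library                                           (no filter)
--     """
--     min_needed = max(count + choices_count, _MIN_POOL)
--
--     # No filters → whole library
--     if not genres and not eras:
--         return list(song_library)
--
--     genres_set = set(genres) if genres else None
--     eras_set   = set(eras)   if eras   else None
--
--     def genre_ok(song: dict) -> bool:
--         return genres_set is None or song["genre"] in genres_set
--
--     def era_ok(song: dict) -> bool: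
--         return eras_set is None or song["era"] in eras_set
--
--     # Step 1 — exact filter
--     pool = [s for s in song_library if genre_ok(s) and era_ok(s)]
--     if len(pool) >= min_needed:
--         return pool
--
--     # Step 2 — add related genres (era filter kept)
--     if genres_set:
--         related: set = set()
--         for g in genres_set:
--             related.update(related_genres_map.get(g, []))
--         related -= genres_set  # avoid re-adding already-selected genres
--
--         expanded = genres_set | related
--         pool = [s for s in song_library
--                 if s["genre"] in expanded and era_ok(s)]
--         if len(pool) >= min_needed:
--             return pool
--
--     # Step 3 — relax era, keep original genres
--     if eras_set and genres_set:
--         pool = [s for s in song_library if s["genre"] in genres_set]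
--         if len(pool) >= min_needed:
--             return pool
--
--     # Step 4 — full library
--     return list(song_library)
-- ===== SOURCE B (Python) =====
-- from typing import Dict, List, Optional
--
-- _MIN_POOL = 12
--
-- def _build_song_pool(
--     song_library: List[Dict[str, str]],
--     genres: Optional[List[str]],
--     eras: Optional[List[str]],
--     count: int,
--     choices_count: int,
--     related_genres_map: Dict[str, List[str]],
-- ) -> List[Dict[str, str]]:
--     """Single-pass re-implementation: ONE traversal of song_library classifies
--     every song into all three fallback pools at once; the pools are then
--     inspected in fallback order and the first big enough is returned."""
--     min_needed = max(count + choices_count, _MIN_POOL)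
--
--     if not genres and not eras:
--         return list(song_library)
--
--     gs = set(genres) if genres else None
--     es = set(eras) if eras else None
--
--     expanded = None
--     if gs:
--         expanded = set(gs)
--         for g in gs:
--             expanded.update(related_genres_map.get(g, []))
--
--     exact, related_pool, genre_only = [], [], []
--     for s in song_library:
--         g_ok = gs is None or s["genre"] in gs
--         e_ok = es is None or s["era"] in es
--         if g_ok and e_ok:
--             exact.append(s)
--         if gs is not None and s["genre"] in expanded and e_ok:
--             related_pool.append(s)
--         if gs is not None and es is not None and s["genre"] in gs:
--             genre_only.append(s)
--
--     if len(exact) >= min_needed: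
--         return exact
--     if gs is not None and len(related_pool) >= min_needed:
--         return related_pool
--     if gs is not None and es is not None and len(genre_only) >= min_needed:
--         return genre_only
--     return list(song_library)
-- ===== Notes on version B (the rewrite author's own statement) =====
-- stated objective: alternative
-- what changed: Replaces A's sequence of up-to-three separate filter-then-early-return passes over the library by a single traversal that classifies every song into all three fallback pools simultaneously with list accumulators, followed by a selection step over the finished pools.
-- outside the precondition, e.g. on _build_song_pool([{'era': '90s'}], ['pop'], None, 1, 1, {}): A raises KeyError, B raises KeyError
import Mathlib
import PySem

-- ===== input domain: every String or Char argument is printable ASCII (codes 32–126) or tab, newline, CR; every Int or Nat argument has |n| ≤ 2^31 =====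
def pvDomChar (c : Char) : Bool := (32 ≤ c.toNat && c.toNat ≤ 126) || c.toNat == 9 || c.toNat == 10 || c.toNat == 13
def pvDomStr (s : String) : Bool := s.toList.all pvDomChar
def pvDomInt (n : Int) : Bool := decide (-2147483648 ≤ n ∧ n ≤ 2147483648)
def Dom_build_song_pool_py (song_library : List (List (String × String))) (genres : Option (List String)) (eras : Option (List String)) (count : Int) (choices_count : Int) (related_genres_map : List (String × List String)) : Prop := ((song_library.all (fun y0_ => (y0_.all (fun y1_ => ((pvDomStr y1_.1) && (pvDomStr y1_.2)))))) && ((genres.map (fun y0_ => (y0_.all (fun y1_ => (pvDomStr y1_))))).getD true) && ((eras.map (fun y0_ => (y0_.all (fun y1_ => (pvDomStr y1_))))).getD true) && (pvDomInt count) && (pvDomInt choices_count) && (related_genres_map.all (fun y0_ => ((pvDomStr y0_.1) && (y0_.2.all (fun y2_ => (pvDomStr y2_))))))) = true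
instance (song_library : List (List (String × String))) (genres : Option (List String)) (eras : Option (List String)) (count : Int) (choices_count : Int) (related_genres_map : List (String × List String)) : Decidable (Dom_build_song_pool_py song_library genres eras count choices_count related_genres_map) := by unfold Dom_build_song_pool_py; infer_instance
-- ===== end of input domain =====

-- B replaces A's up-to-three sequential filter-then-return passes by ONE traversal of the
-- library that classifies every song into all three fallback pools at once (objective: alternative).

-- ===== PORT A =====
-- song["genre"] / song["era"]: first-match dict lookup; the KeyError case is excluded by Pre_
def pvSongVal (s : List (String × String)) (k : String) : String :=
  (PySem.Dict.get? (PySem.Dict.mk s) k).getD ""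

def build_song_pool_py (song_library : List (List (String × String))) (genres : Option (List String)) (eras : Option (List String)) (count : Int) (choices_count : Int) (related_genres_map : List (String × List String)) : List (List (String × String)) :=
  let min_needed : Int := max (count + choices_count) 12
  -- "if not genres and not eras": None and [] are both falsy
  if (genres.getD []).isEmpty && (eras.getD []).isEmpty then
    song_library
  else
    let genres_set : Option (PySem.Set String) :=
      if (genres.getD []).isEmpty then none else some (PySem.Set.ofList (genres.getD []))
    let eras_set : Option (PySem.Set String) :=
      if (eras.getD []).isEmpty then none else some (PySem.Set.ofList (eras.getD []))
    let genre_ok : List (String × String) → Bool := fun s =>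
      match genres_set with
      | none => true
      | some gs => PySem.Set.contains gs (pvSongVal s "genre")
    let era_ok : List (String × String) → Bool := fun s =>
      match eras_set with
      | none => true
      | some es => PySem.Set.contains es (pvSongVal s "era")
    -- Step 1 — exact filter
    let pool := song_library.filter (fun s => genre_ok s && era_ok s)
    if min_needed ≤ (pool.length : Int) then pool
    else
      -- Step 2 — add related genres (era filter kept); genres_set is nonempty whenever `some`
      match genres_set with
      | some gs =>
        let related : PySem.Set String := PySem.Set.diff
          (gs.foldl (fun r g => PySem.Set.update r ((PySem.Dict.get? (PySem.Dict.mk related_genres_map) g).getD [])) PySem.Set.empty) gs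
        let expanded : PySem.Set String := PySem.Set.union gs related
        let pool2 := song_library.filter (fun s =>
          PySem.Set.contains expanded (pvSongVal s "genre") && era_ok s)
        if min_needed ≤ (pool2.length : Int) then pool2
        else
          -- Step 3 — relax era, keep original genres (needs both filters)
          match eras_set with
          | some _ =>
            let pool3 := song_library.filter (fun s => PySem.Set.contains gs (pvSongVal s "genre"))
            if min_needed ≤ (pool3.length : Int) then pool3
            else song_library
          | none => song_library
      | none => song_library

-- ===== PORT B =====
def build_song_pool_py_alt (song_library : List (List (String × String))) (genres : Option (List String)) (eras : Option (List String)) (count : Int) (choices_count : Int) (related_genres_map : List (String × List String)) : List (List (String × String)) :=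
  let min_needed : Int := max (count + choices_count) 12
  if (genres.getD []).isEmpty && (eras.getD []).isEmpty then
    song_library
  else
    let genres_set : Option (PySem.Set String) :=
      if (genres.getD []).isEmpty then none else some (PySem.Set.ofList (genres.getD []))
    let eras_set : Option (PySem.Set String) :=
      if (eras.getD []).isEmpty then none else some (PySem.Set.ofList (eras.getD []))
    -- expanded = copy of genres_set updated with every related list
    let expanded : Option (PySem.Set String) :=
      match genres_set with
      | none => none
      | some gs => some (gs.foldl (fun e g => PySem.Set.update e ((PySem.Dict.get? (PySem.Dict.mk related_genres_map) g).getD [])) gs)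
    -- ONE pass: each song is appended to every pool whose guarded condition it meets
    let pools := song_library.foldl
      (fun (acc : List (List (String × String)) × List (List (String × String)) × List (List (String × String))) s =>
        let g_ok := match genres_set with
          | none => true
          | some gs => PySem.Set.contains gs (pvSongVal s "genre")
        let e_ok := match eras_set with
          | none => true
          | some es => PySem.Set.contains es (pvSongVal s "era")
        (if g_ok && e_ok then acc.1 ++ [s] else acc.1,
         if (match genres_set, expanded with
             | some _, some ex => PySem.Set.contains ex (pvSongVal s "genre") && e_ok
             | _, _ => false) then acc.2.1 ++ [s] else acc.2.1,
         if (match genres_set, eras_set with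
             | some gs, some _ => PySem.Set.contains gs (pvSongVal s "genre")
             | _, _ => false) then acc.2.2 ++ [s] else acc.2.2))
      ([], [], [])
    if min_needed ≤ (pools.1.length : Int) then pools.1
    else if genres_set.isSome && decide (min_needed ≤ (pools.2.1.length : Int)) then pools.2.1
    else if genres_set.isSome && eras_set.isSome && decide (min_needed ≤ (pools.2.2.length : Int)) then pools.2.2
    else song_library

-- ===== PRECONDITION & SPEC =====
-- Pre_ excludes libraries in which some song lacks the "genre" key while a genre filter is
-- active, or lacks the "era" key while an era filter is active: on most such inputs A raises
-- KeyError, and whether it raises depends on which earlier filter a song happens to fail.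
def Pre_build_song_pool_py (song_library : List (List (String × String))) (genres : Option (List String)) (eras : Option (List String)) (count : Int) (choices_count : Int) (related_genres_map : List (String × List String)) : Prop :=
  (¬ (genres.getD []).isEmpty = true →
    ∀ s ∈ song_library, PySem.Dict.contains (PySem.Dict.mk s) "genre" = true) ∧
  (¬ (eras.getD []).isEmpty = true →
    ∀ s ∈ song_library, PySem.Dict.contains (PySem.Dict.mk s) "era" = true)
instance (song_library : List (List (String × String))) (genres : Option (List String)) (eras : Option (List String)) (count : Int) (choices_count : Int) (related_genres_map : List (String × List String)) : Decidable (Pre_build_song_pool_py song_library genres eras count choices_count related_genres_map) := by unfold Pre_build_song_pool_py; infer_instance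

def pvWitness_build_song_pool_py : (List (List (String × String))) × Option (List String) × Option (List String) × Int × Int × (List (String × List String)) :=
  ([[("genre", "rock"), ("era", "90s")]], some ["rock"], none, 1, 1, [("rock", ["pop"])])

def Spec_build_song_pool_py (song_library : List (List (String × String))) (genres : Option (List String)) (eras : Option (List String)) (count : Int) (choices_count : Int) (related_genres_map : List (String × List String)) (out : List (List (String × String))) : Prop := out = build_song_pool_py_alt song_library genres eras count choices_count related_genres_map
instance (song_library : List (List (String × String))) (genres : Option (List String)) (eras : Option (List String)) (count : Int) (choices_count : Int) (related_genres_map : List (String × List String)) (out : List (List (String × String))) : Decidable (Spec_build_song_pool_py song_library genres eras count choices_count related_genres_map out) := by unfold Spec_build_song_pool_py; infer_instance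

-- ===== CLAIM (what is proved, stated in full; the proofs are below) =====
def Claim_equal_build_song_pool_py : Prop := ∀ (song_library : List (List (String × String))) (genres : Option (List String)) (eras : Option (List String)) (count : Int) (choices_count : Int) (related_genres_map : List (String × List String)), Dom_build_song_pool_py song_library genres eras count choices_count related_genres_map → Pre_build_song_pool_py song_library genres eras count choices_count related_genres_map → Spec_build_song_pool_py song_library genres eras count choices_count related_genres_map (build_song_pool_py song_library genres eras count choices_count related_genres_map)

-- ===== LEMMAS AND PROOFS =====

-- the one-pass triple accumulator equals the three filters
theorem pv_foldl_tri {α : Type} (q1 q2 q3 : α → Bool) (l : List α) (a b c : List α) :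
    l.foldl (fun acc s =>
        (if q1 s then acc.1 ++ [s] else acc.1,
         if q2 s then acc.2.1 ++ [s] else acc.2.1,
         if q3 s then acc.2.2 ++ [s] else acc.2.2)) (a, b, c)
      = (a ++ l.filter q1, b ++ l.filter q2, c ++ l.filter q3) := by
  induction l generalizing a b c with
  | nil => simp
  | cons x t ih =>
    simp only [List.foldl_cons, ih, List.filter_cons]
    by_cases h1 : q1 x <;> by_cases h2 : q2 x <;> by_cases h3 : q3 x <;> simp [h1, h2, h3]

-- variant when the guards of pools 2 and 3 are identically false (collapsed by reduction)
theorem pv_foldl_one {α β : Type} (q1 : α → Bool) (l : List α) (a : List α) (b : β) :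
    l.foldl (fun acc s => (if q1 s then acc.1 ++ [s] else acc.1, acc.2)) (a, b)
      = (a ++ l.filter q1, b) := by
  induction l generalizing a with
  | nil => simp
  | cons x t ih =>
    simp only [List.foldl_cons, ih, List.filter_cons]
    by_cases h1 : q1 x <;> simp [h1]

-- variant when only the guard of pool 3 is identically false
theorem pv_foldl_two {α β : Type} (q1 q2 : α → Bool) (l : List α) (a b : List α) (c : β) :
    l.foldl (fun acc s =>
        (if q1 s then acc.1 ++ [s] else acc.1,
         if q2 s then acc.2.1 ++ [s] else acc.2.1, acc.2.2)) (a, b, c)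
      = (a ++ l.filter q1, b ++ l.filter q2, c) := by
  induction l generalizing a b with
  | nil => simp
  | cons x t ih =>
    simp only [List.foldl_cons, ih, List.filter_cons]
    by_cases h1 : q1 x <;> by_cases h2 : q2 x <;> simp [h1, h2]

-- membership in a loop of set.update(f g) over a list
theorem pv_mem_foldl_update (f : String → List String) (l : List String)
    (acc : PySem.Set String) (x : String) :
    x ∈ l.foldl (fun r g => PySem.Set.update r (f g)) acc ↔ x ∈ acc ∨ ∃ g ∈ l, x ∈ f g := by
  induction l generalizing acc with
  | nil => simp
  | cons a t ih => simp [ih, PySem.Set.mem_update, or_assoc]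

-- A's `genres_set | (related - genres_set)` and B's updated copy of genres_set agree as sets
theorem pv_expanded_contains (gs : PySem.Set String) (f : String → List String) (x : String) :
    PySem.Set.contains (PySem.Set.union gs (PySem.Set.diff
        (gs.foldl (fun r g => PySem.Set.update r (f g)) PySem.Set.empty) gs)) x
      = PySem.Set.contains (gs.foldl (fun r g => PySem.Set.update r (f g)) gs) x := by
  rw [Bool.eq_iff_iff, PySem.Set.contains_iff, PySem.Set.contains_iff,
      PySem.Set.mem_union, PySem.Set.mem_diff, pv_mem_foldl_update, pv_mem_foldl_update]
  simp only [PySem.Set.empty, List.not_mem_nil, false_or]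
  tauto

-- ===== VERDICT (by name: the statement is the Claim_ definition above) =====
theorem build_song_pool_py_spec : Claim_equal_build_song_pool_py := by
  intro lib genres eras count cc rmap _ _
  unfold Spec_build_song_pool_py
  unfold build_song_pool_py build_song_pool_py_alt
  by_cases hg : (genres.getD []).isEmpty <;> by_cases he : (eras.getD []).isEmpty <;>
    simp only [hg, he, Bool.and_true, Bool.true_and, Bool.false_eq_true, if_false, if_true,
      pv_foldl_tri, pv_foldl_two, pv_foldl_one, List.nil_append, Option.isSome_some, Option.isSome_none,
      pv_expanded_contains, decide_eq_true_eq, Bool.false_and,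
      Bool.and_false]
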